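-- pv_equiv track=rewrite | github.com/Chrono-Anubis/Project-LexiLegion | rag_engine.py | reorder_context_deterministic
-- ===== SOURCE A (Python) =====
-- def reorder_context_deterministic(context_docs):
--     """
--     Reorders documents to place most relevant info at start/end (Lost in the Middle fix).
--     """
--     if len(context_docs) <= 2: return context_docs
--
--     reordered = []
--     # Convert to deque or just list handling
--     # Strategy: [1, 3, 5, ..., 6, 4, 2] logic
--     # Simple implementation: Alternate adding to start and end
--     # But for list return: [Best, 3rd, 5th ... 6th, 4th, 2nd]
--     # Actually simpler: [Best, ..., Worst, ..., 2nd Best]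
--     # Common approach: [0, 2, 4, ... 5, 3, 1]
--
--     # Let's use the explicit "Best at ends" logic
--     # Input is sorted by relevance (Best -> Worst)
--     # Output layout: [1, 3, 5, 7, 9, 10, 8, 6, 4, 2]
--
--     layout = [None] * len(context_docs)
--     left, right = 0, len(context_docs) - 1
--
--     for i, doc in enumerate(context_docs):
--         if i % 2 == 0:
--             layout[left] = doc
--             left += 1
--         else:
--             layout[right] = doc
--             right -= 1
--
--     return layout
-- ===== SOURCE B (Python) =====
-- def reorder_context_deterministic(context_docs):
--     if len(context_docs) <= 2: return context_docs
--     return context_docs[0::2] + context_docs[1::2][::-1]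
-- ===== Notes on version B (the rewrite author's own statement) =====
-- stated objective: simpler
-- what changed: Replaces A's preallocated [None]*n buffer filled by a two-pointer loop over enumerate with a direct expression: the even-indexed stride slice followed by the reversed odd-indexed stride slice.
import Mathlib
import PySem

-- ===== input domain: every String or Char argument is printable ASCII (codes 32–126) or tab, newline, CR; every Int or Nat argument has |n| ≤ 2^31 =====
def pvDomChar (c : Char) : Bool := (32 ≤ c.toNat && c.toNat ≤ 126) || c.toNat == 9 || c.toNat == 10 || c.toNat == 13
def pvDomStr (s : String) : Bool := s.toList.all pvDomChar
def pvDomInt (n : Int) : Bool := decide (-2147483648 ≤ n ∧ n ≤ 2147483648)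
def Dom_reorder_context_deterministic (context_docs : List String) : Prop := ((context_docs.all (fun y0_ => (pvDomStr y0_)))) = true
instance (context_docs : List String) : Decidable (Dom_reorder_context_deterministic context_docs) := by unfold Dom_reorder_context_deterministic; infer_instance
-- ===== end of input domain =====

-- B replaces A's preallocated-buffer two-pointer fill loop with two strided slices
-- (even-indexed docs, then the odd-indexed docs reversed); objective: simpler.

-- ===== PORT A =====
-- layout = [None] * n: "" is the placeholder (every slot is overwritten exactly once
-- before the list is returned, so no placeholder survives).
-- left/right are Python ints (Int); layout[left] / layout[right] always hit in range
-- with nonnegative index, so .toNat on the set index is exact here.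
def reorder_context_deterministic (context_docs : List String) : List String :=
  if context_docs.length ≤ 2 then context_docs
  else
    let layout := List.replicate context_docs.length ""
    let st :=
      (PySem.List.enumerate context_docs 0).foldl
        (fun (st : List String × Int × Int) (p : Int × String) =>
          let layout := st.1
          let left := st.2.1
          let right := st.2.2
          if PySem.Int.mod p.1 2 == 0 then
            (layout.set left.toNat p.2, left + 1, right)
          else
            (layout.set right.toNat p.2, left, right - 1))
        (layout, 0, (context_docs.length : Int) - 1)
    st.1

-- ===== PORT B =====
-- hand port of the strided slice xs[0::2] (exact: every second element from the head);
-- xs[1::2] is pvStride2 xs.tail, and [::-1] is List.reverse.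
def pvStride2 : List String → List String
  | [] => []
  | [x] => [x]
  | x :: _ :: xs => x :: pvStride2 xs

def reorder_context_deterministic_alt (context_docs : List String) : List String :=
  if context_docs.length ≤ 2 then context_docs
  else pvStride2 context_docs ++ (pvStride2 context_docs.tail).reverse

-- ===== PRECONDITION & SPEC =====
def Spec_reorder_context_deterministic (context_docs : List String) (out : List String) : Prop := out = reorder_context_deterministic_alt context_docs
instance (context_docs : List String) (out : List String) : Decidable (Spec_reorder_context_deterministic context_docs out) := by unfold Spec_reorder_context_deterministic; infer_instance

-- ===== CLAIM (what is proved, stated in full; the proofs are below) =====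
def Claim_equal_reorder_context_deterministic : Prop := ∀ (context_docs : List String), Dom_reorder_context_deterministic context_docs → Spec_reorder_context_deterministic context_docs (reorder_context_deterministic context_docs)

-- ===== LEMMAS AND PROOFS =====

-- A's loop with the enumerate counter replaced by its parity (true = even index next).
def pvGo : List String → List String → Int → Int → Bool → List String
  | [], L, _, _, _ => L
  | d :: ds, L, l, r, b =>
    if b then pvGo ds (L.set l.toNat d) (l + 1) r false
    else pvGo ds (L.set r.toNat d) l (r - 1) true

theorem pvStride2_cons (d : String) (ds : List String) :
    pvStride2 (d :: ds) = d :: pvStride2 ds.tail := by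
  cases ds <;> simp [pvStride2]

theorem pvTakeSetSucc (L : List String) (n : Nat) (d : String) (h : n < L.length) :
    (L.set n d).take (n + 1) = L.take n ++ [d] := by
  rw [List.take_set, ← List.take_concat_get' L n h, List.set_append,
    if_neg (by simp [List.length_take])]
  simp [List.length_take, Nat.min_eq_left (Nat.le_of_lt h)]

theorem pvTakeSetOfLe (L : List String) (m n : Nat) (d : String) (h : m ≤ n) :
    (L.set n d).take m = L.take m := by
  rw [List.take_set, List.set_eq_of_length_le (by simp [List.length_take]; omega)]

theorem pvDropSetOfLt (L : List String) (m n : Nat) (d : String) (h : n < m) :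
    (L.set n d).drop m = L.drop m := by
  rw [List.drop_set, if_pos h]

theorem pvDropSetSelf (L : List String) (n : Nat) (d : String) (h : n < L.length) :
    (L.set n d).drop n = d :: L.drop (n + 1) := by
  rw [List.drop_set, if_neg (by omega)]
  simp only [Nat.sub_self]
  rw [List.drop_eq_getElem_cons h, List.set_cons_zero]

theorem pvFoldl_eq_pvGo (ds : List String) :
    ∀ (k : Int), 0 ≤ k → ∀ (L : List String) (l r : Int),
    ((PySem.List.enumerate ds k).foldl
        (fun (st : List String × Int × Int) (p : Int × String) =>
          let layout := st.1
          let left := st.2.1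
          let right := st.2.2
          if PySem.Int.mod p.1 2 == 0 then
            (layout.set left.toNat p.2, left + 1, right)
          else
            (layout.set right.toNat p.2, left, right - 1))
        (L, l, r)).1
      = pvGo ds L l r (PySem.Int.mod k 2 == 0) := by
  induction ds with
  | nil => intro k hk L l r; simp [PySem.List.enumerate_nil, pvGo]
  | cons d ds ih =>
    intro k hk L l r
    rw [PySem.List.enumerate_cons, List.foldl_cons]
    have hmod : PySem.Int.mod k 2 = k % 2 := PySem.Int.mod_eq_emod_of_pos (by omega)
    have hmod' : PySem.Int.mod (k + 1) 2 = (k + 1) % 2 :=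
      PySem.Int.mod_eq_emod_of_pos (by omega)
    by_cases hk2 : k % 2 = 0
    · have h1 : (k + 1) % 2 = 1 := by omega
      simp only [hmod, hk2]
      rw [if_pos (by decide)]
      rw [ih (k + 1) (by omega) (L.set l.toNat d) (l + 1) r]
      simp [pvGo, h1]
    · have h0 : k % 2 = 1 := by omega
      have h1 : (k + 1) % 2 = 0 := by omega
      simp only [hmod, h0]
      rw [if_neg (by decide)]
      rw [ih (k + 1) (by omega) (L.set r.toNat d) l (r - 1)]
      simp [pvGo, h1]

theorem pvGo_spec (ds : List String) :
    ∀ (L : List String) (l r : Int) (b : Bool), 0 ≤ l →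
    r + 1 = l + ds.length → r < L.length →
    pvGo ds L l r b
      = L.take l.toNat
        ++ (if b then pvStride2 ds else pvStride2 ds.tail)
        ++ (if b then pvStride2 ds.tail else pvStride2 ds).reverse
        ++ L.drop (r + 1).toNat := by
  induction ds with
  | nil =>
    intro L l r b hl hr _
    have : l = r + 1 := by simp at hr; omega
    subst this
    simp [pvGo, pvStride2]
  | cons d ds ih =>
    intro L l r b hl hr hrL
    have hlen : ((d :: ds).length : Int) = (ds.length : Int) + 1 := by simp
    have hds : 0 ≤ (ds.length : Int) := by positivity
    have hr0 : 0 ≤ r := by omega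
    have hlr : l ≤ r := by omega
    have hlL : l.toNat < L.length := by omega
    have hrLn : r.toNat < L.length := by omega
    cases b with
    | true =>
      rw [pvGo, if_pos rfl,
        ih (L.set l.toNat d) (l + 1) r false (by omega)
          (by omega) (by simp only [List.length_set]; omega)]
      have h1 : (l + 1).toNat = l.toNat + 1 := by omega
      have htake : (L.set l.toNat d).take (l + 1).toNat = L.take l.toNat ++ [d] := by
        rw [h1]; exact pvTakeSetSucc L l.toNat d hlL
      have hdrop : (L.set l.toNat d).drop (r + 1).toNat = L.drop (r + 1).toNat :=
        pvDropSetOfLt L (r + 1).toNat l.toNat d (by omega)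
      rw [htake, hdrop, pvStride2_cons]
      simp [List.append_assoc]
    | false =>
      rw [pvGo, if_neg (by simp),
        ih (L.set r.toNat d) l (r - 1) true (by omega)
          (by omega) (by simp only [List.length_set]; omega)]
      have htake : (L.set r.toNat d).take l.toNat = L.take l.toNat :=
        pvTakeSetOfLe L l.toNat r.toNat d (by omega)
      have h1 : (r - 1 + 1).toNat = r.toNat := by omega
      have h2 : (r + 1).toNat = r.toNat + 1 := by omega
      have hdrop : (L.set r.toNat d).drop (r - 1 + 1).toNat = d :: L.drop (r + 1).toNat := by
        rw [h1, h2]; exact pvDropSetSelf L r.toNat d hrLn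
      rw [htake, hdrop, pvStride2_cons]
      simp [List.append_assoc]

-- ===== VERDICT (by name: the statement is the Claim_ definition above) =====
theorem reorder_context_deterministic_spec : Claim_equal_reorder_context_deterministic := by
  intro ds _
  unfold Spec_reorder_context_deterministic reorder_context_deterministic reorder_context_deterministic_alt
  by_cases h : ds.length ≤ 2
  · simp [h]
  · rw [if_neg h, if_neg h]
    rw [pvFoldl_eq_pvGo ds 0 le_rfl (List.replicate ds.length "") 0 ((ds.length : Int) - 1)]
    have hm : (PySem.Int.mod 0 2 == 0) = true := by decide
    rw [hm]
    rw [pvGo_spec ds (List.replicate ds.length "") 0 ((ds.length : Int) - 1) true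
      le_rfl (by omega) (by simp only [List.length_replicate]; omega)]
    have hn : ((ds.length : Int) - 1 + 1).toNat = ds.length := by omega
    simp
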